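-- pv_equiv track=rewrite | github.com/rmbrmv/contenthunter | .ai-factory/tools/yt_failure_triage.py | last_step_of
-- ===== SOURCE A (Python) =====
-- def last_step_of(events):
--     if not events:
--         return None
--     for ev in reversed(events):
--         if ev.get('type') in ('start', 'info'):
--             msg = ev.get('msg') or ''
--             return msg[:50]
--     return None
-- ===== SOURCE B (Python) =====
-- def last_step_of(events):
--     msgs = [ev.get('msg', '')[:50] for ev in events
--             if ev.get('type', '') in ('start', 'info')]
--     return msgs[-1] if msgs else None
-- ===== Notes on version B (the rewrite author's own statement) =====
-- stated objective: alternative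
-- what changed: Replaced A's reverse-iteration early-return search with a staged filter-and-map comprehension over the forward list followed by taking the last collected message.
import Mathlib
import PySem

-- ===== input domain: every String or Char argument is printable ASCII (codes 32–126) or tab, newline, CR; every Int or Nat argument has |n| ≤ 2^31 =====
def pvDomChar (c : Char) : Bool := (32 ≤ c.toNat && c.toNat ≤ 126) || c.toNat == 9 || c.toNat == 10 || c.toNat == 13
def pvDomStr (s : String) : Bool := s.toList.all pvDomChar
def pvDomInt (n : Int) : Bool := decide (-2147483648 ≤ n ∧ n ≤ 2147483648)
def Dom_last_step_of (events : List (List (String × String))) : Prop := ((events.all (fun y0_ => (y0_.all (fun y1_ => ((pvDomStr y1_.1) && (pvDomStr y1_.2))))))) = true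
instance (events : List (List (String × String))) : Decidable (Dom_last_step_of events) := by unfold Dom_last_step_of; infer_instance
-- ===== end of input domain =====

-- B replaces A's reverse early-return search with a staged filter+map over the forward list followed by getLast? (alternative decomposition, same cost).
-- ===== PORT A =====
-- the for-loop over reversed(events) with early return; 'ev.get('msg') or \'\'' is the match below
def lastStepOfRevLoop : List (List (String × String)) → Option String
  | [] => none
  | ev :: rest =>
      let t := (PySem.Dict.mk ev).get? "type"
      if t = some "start" ∨ t = some "info" then
        let msg := match (PySem.Dict.mk ev).get? "msg" with
          | some m => if m = "" then "" else m
          | none => ""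
        some (PySem.Str.slice msg none (some 50))
      else lastStepOfRevLoop rest

def last_step_of (events : List (List (String × String))) : Option String :=
  if events = [] then none
  else lastStepOfRevLoop events.reverse

-- ===== PORT B =====
-- the comprehension's filter clause: ev.get('type', '') in ('start', 'info')
def pvKeep (ev : List (String × String)) : Bool :=
  ["start", "info"].contains ((PySem.Dict.mk ev).getD "type" "")

-- the comprehension's value: ev.get('msg', '')[:50]
def pvTrunc (ev : List (String × String)) : String :=
  PySem.Str.slice ((PySem.Dict.mk ev).getD "msg" "") none (some 50)

-- msgs = [...]; return msgs[-1] if msgs else None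
def last_step_of_alt (events : List (List (String × String))) : Option String :=
  ((events.filter pvKeep).map pvTrunc).getLast?

-- ===== PRECONDITION & SPEC =====
def Spec_last_step_of (events : List (List (String × String))) (out : Option String) : Prop := out = last_step_of_alt events
instance (events : List (List (String × String))) (out : Option String) : Decidable (Spec_last_step_of events out) := by unfold Spec_last_step_of; infer_instance

-- ===== CLAIM (what is proved, stated in full; the proofs are below) =====
def Claim_equal_last_step_of : Prop := ∀ (events : List (List (String × String))), Dom_last_step_of events → Spec_last_step_of events (last_step_of events)

-- ===== LEMMAS AND PROOFS =====

-- the per-event result of one iteration of A's loop, phrased with B's helpers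
def pvMatch (ev : List (String × String)) : Option String :=
  if pvKeep ev then some (pvTrunc ev) else none

theorem pvKeep_iff (ev : List (String × String)) :
    pvKeep ev = true ↔
      ((PySem.Dict.mk ev).get? "type" = some "start" ∨ (PySem.Dict.mk ev).get? "type" = some "info") := by
  unfold pvKeep PySem.Dict.getD
  cases ht : (PySem.Dict.mk ev).get? "type" with
  | none => simp
  | some t => simp [List.contains_eq_mem]

theorem pvTrunc_eq (ev : List (String × String)) :
    pvTrunc ev =
      PySem.Str.slice
        (match (PySem.Dict.mk ev).get? "msg" with
         | some m => if m = "" then "" else m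
         | none => "") none (some 50) := by
  unfold pvTrunc PySem.Dict.getD
  cases hm : (PySem.Dict.mk ev).get? "msg" with
  | none => rfl
  | some m => by_cases hme : m = "" <;> simp [hme]

theorem loop_eq_findSome? (xs : List (List (String × String))) :
    lastStepOfRevLoop xs = xs.findSome? pvMatch := by
  induction xs with
  | nil => rfl
  | cons ev rest ih =>
      rw [List.findSome?_cons]
      simp only [lastStepOfRevLoop]
      by_cases h : (PySem.Dict.mk ev).get? "type" = some "start" ∨
          (PySem.Dict.mk ev).get? "type" = some "info"
      · have hk : pvMatch ev = some (pvTrunc ev) := by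
          rw [pvMatch, if_pos ((pvKeep_iff ev).mpr h)]
        rw [if_pos h, hk, ← pvTrunc_eq]
      · have hk : pvMatch ev = none := by
          rw [pvMatch, if_neg (fun hb => h ((pvKeep_iff ev).mp hb))]
        rw [if_neg h, hk, ih]

theorem findSome?_reverse_eq_getLast?_filterMap (xs : List (List (String × String))) :
    xs.reverse.findSome? pvMatch = (xs.filterMap pvMatch).getLast? := by
  induction xs with
  | nil => rfl
  | cons ev rest ih =>
      rw [List.reverse_cons, List.findSome?_append, ih, List.filterMap_cons]
      cases h : pvMatch ev with
      | none => cases hr : (rest.filterMap pvMatch).getLast? <;> simp [h]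
      | some b =>
          cases hfm : rest.filterMap pvMatch with
          | nil => simp [h]
          | cons y ys =>
              obtain ⟨v, hv⟩ := Option.isSome_iff_exists.mp
                (List.getLast?_isSome.mpr (List.cons_ne_nil y ys))
              simp [hv, List.getLast?_cons_cons]

theorem filterMap_pvMatch (xs : List (List (String × String))) :
    xs.filterMap pvMatch = (xs.filter pvKeep).map pvTrunc := by
  induction xs with
  | nil => rfl
  | cons ev rest ih =>
      by_cases h : pvKeep ev
      · rw [List.filterMap_cons, List.filter_cons, if_pos (by simp [h]), List.map_cons, ← ih]
        simp [pvMatch, h]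
      · rw [List.filterMap_cons, List.filter_cons, if_neg (by simp [h]), ← ih]
        simp [pvMatch, h]

-- ===== VERDICT (by name: the statement is the Claim_ definition above) =====
theorem last_step_of_spec : Claim_equal_last_step_of := by
  intro events _
  unfold Spec_last_step_of last_step_of last_step_of_alt
  rw [← filterMap_pvMatch, ← findSome?_reverse_eq_getLast?_filterMap, ← loop_eq_findSome?]
  cases events with
  | nil => rfl
  | cons e es => simp [List.cons_ne_nil]
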